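-- pv_equiv track=rewrite | github.com/iproha94/contests | yandex.contest/17630/K.py | f
-- ===== SOURCE A (Python) =====
-- def f(arr):
--     d = {}
--     prev = None
--     m = []
--     for a in arr:
--         if a == prev:
--             m.append(m[-1])
--         else:
--             d.setdefault(a, 0)
--             d[a] += 1
--             m.append(d[a])
--
--         prev = a
--
--     a_counts = {}
--     for a in arr:
--         a_counts[a] = a_counts.get(a, 0) + 1
--
--     result = []
--     deleted = set()
--     for i in range(len(arr)):
--         if m[i] != 1:
--             result.append(arr[i])
--         elif d[arr[i]] == 1 and a_counts[arr[i]] > 1 and arr[i] not in deleted: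
--             result.append(arr[i])
--             deleted.add(arr[i])
--
--     return f"{len(result)}\n" + "".join(str(r) + ' ' for r in result)
-- ===== SOURCE B (Python) =====
-- def f(arr):
--     # decompose into consecutive runs (value, length)
--     runs = []
--     for a in arr:
--         if runs and runs[-1][0] == a:
--             runs[-1][1] += 1
--         else:
--             runs.append([a, 1])
--     # per-value total run count and total element count
--     nruns = {}
--     total = {}
--     for v, n in runs:
--         nruns[v] = nruns.get(v, 0) + 1
--         total[v] = total.get(v, 0) + n
--     result = []
--     seen = {}
--     for v, n in runs:
--         seen[v] = seen.get(v, 0) + 1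
--         if seen[v] > 1:
--             result.extend([v] * n)
--         elif nruns[v] == 1 and total[v] > 1:
--             result.append(v)
--     return f"{len(result)}\n" + "".join(str(r) + ' ' for r in result)
-- ===== Notes on version B (the rewrite author's own statement) =====
-- stated objective: simpler
-- what changed: B decomposes the array into consecutive (value, length) runs and decides each run at once from per-value run/element totals, replacing A's per-element run-index array m[], setdefault dict bookkeeping and deleted-set scan of every element.
import Mathlib
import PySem

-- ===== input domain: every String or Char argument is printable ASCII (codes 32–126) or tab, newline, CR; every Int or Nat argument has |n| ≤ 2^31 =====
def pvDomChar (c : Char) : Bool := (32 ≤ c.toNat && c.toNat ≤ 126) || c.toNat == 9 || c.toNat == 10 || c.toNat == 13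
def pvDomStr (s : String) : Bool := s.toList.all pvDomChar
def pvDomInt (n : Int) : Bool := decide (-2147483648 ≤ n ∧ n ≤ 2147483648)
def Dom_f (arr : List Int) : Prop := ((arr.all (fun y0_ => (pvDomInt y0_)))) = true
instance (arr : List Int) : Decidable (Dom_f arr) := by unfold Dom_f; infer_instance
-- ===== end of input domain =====

-- B re-implements A by an explicit run decomposition (runs of equal adjacent values) with
-- per-value run/element totals, replacing A's per-element m[] array and deleted set; objective: simpler.

-- ===== PORT A =====
def f (arr : List Int) : String :=
  -- first loop: d (runs-per-value dict), prev, m (per-element run index)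
  let st := arr.foldl (fun (st : PySem.Dict Int Int × Option Int × List Int) a =>
    match st with
    | (d, prev, m) =>
      if some a = prev then
        (d, some a, m ++ [PySem.List.pyGetD m (-1) 0])  -- m[-1]; m ≠ [] whenever prev = some a
      else
        let d0 := d.setdefault a 0
        let d1 := d0.insert a (d0.getD a 0 + 1)
        (d1, some a, m ++ [d1.getD a 0])                -- d[a] present after the insert
    ) (PySem.Dict.empty, none, [])
  let d := st.1
  let m := st.2.2
  let ac := arr.foldl (fun (t : PySem.Dict Int Int) a => t.insert a (t.getD a 0 + 1)) PySem.Dict.empty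
  let fin := (PySem.List.pyRange 0 (PySem.List.len arr) 1).foldl
    (fun (rs : List Int × PySem.Set Int) i =>
      if PySem.List.pyGetD m i 0 ≠ 1 then           -- m[i], arr[i]: i always in range
        (rs.1 ++ [PySem.List.pyGetD arr i 0], rs.2)
      else if d.getD (PySem.List.pyGetD arr i 0) 0 = 1 ∧
              (ac.getD (PySem.List.pyGetD arr i 0) 0) > 1 ∧
              rs.2.contains (PySem.List.pyGetD arr i 0) = false then
        (rs.1 ++ [PySem.List.pyGetD arr i 0], PySem.Set.add rs.2 (PySem.List.pyGetD arr i 0))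
      else rs) ([], PySem.Set.empty)
  PySem.Int.toStr ((fin.1.length : Int)) ++ "\n" ++
    PySem.Str.join "" (fin.1.map (fun r => PySem.Int.toStr r ++ " "))

-- ===== PORT B =====
def f_alt (arr : List Int) : String :=
  -- runs: consecutive (value, length) pairs, built left to right (runs[-1][1] += 1 = dropLast ++ …)
  let runs := arr.foldl (fun (runs : List (Int × Int)) a =>
    match runs.getLast? with
    | some (v, n) => if v = a then runs.dropLast ++ [(v, n + 1)] else runs ++ [(a, 1)]
    | none => [(a, 1)]) []
  -- per-value total run count and total element count, one pass over runs
  let nt := runs.foldl (fun (t : PySem.Dict Int Int × PySem.Dict Int Int) p =>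
      (t.1.insert p.1 (t.1.getD p.1 0 + 1), t.2.insert p.1 (t.2.getD p.1 0 + p.2)))
    (PySem.Dict.empty, PySem.Dict.empty)
  let fin := runs.foldl (fun (rs : List Int × PySem.Dict Int Int) p =>
      let seen := rs.2.insert p.1 (rs.2.getD p.1 0 + 1)
      if seen.getD p.1 0 > 1 then
        (rs.1 ++ PySem.List.pyRepeat [p.1] p.2, seen)   -- [v] * n
      else if nt.1.getD p.1 0 = 1 ∧ nt.2.getD p.1 0 > 1 then
        (rs.1 ++ [p.1], seen)
      else (rs.1, seen)) ([], PySem.Dict.empty)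
  PySem.Int.toStr ((fin.1.length : Int)) ++ "\n" ++
    PySem.Str.join "" (fin.1.map (fun r => PySem.Int.toStr r ++ " "))

-- ===== PRECONDITION & SPEC =====
def Spec_f (arr : List Int) (out : String) : Prop := out = f_alt arr
instance (arr : List Int) (out : String) : Decidable (Spec_f arr out) := by unfold Spec_f; infer_instance

-- ===== CLAIM (what is proved, stated in full; the proofs are below) =====
def Claim_equal_f : Prop := ∀ (arr : List Int), Dom_f arr → Spec_f arr (f arr)

-- ===== LEMMAS AND PROOFS =====

-- the run-building step of B's first loop
def pvStepR (runs : List (Int × Int)) (a : Int) : List (Int × Int) :=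
  match runs.getLast? with
  | some (v, n) => if v = a then runs.dropLast ++ [(v, n + 1)] else runs ++ [(a, 1)]
  | none => [(a, 1)]

-- run counting dict (B's nruns; also A's final d)
def pvCnt (c : PySem.Dict Int Int) (R : List (Int × Int)) : PySem.Dict Int Int :=
  R.foldl (fun c p => c.insert p.1 (c.getD p.1 0 + 1)) c

-- A's m list, expressed over the runs: each run contributes its run index, repeated
def pvM (c : PySem.Dict Int Int) : List (Int × Int) → List Int
  | [] => []
  | p :: t => List.replicate p.2.toNat (c.getD p.1 0 + 1) ++ pvM (c.insert p.1 (c.getD p.1 0 + 1)) t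

-- per-element (value, run index) pairs
def pvBlocks (c : PySem.Dict Int Int) : List (Int × Int) → List (Int × Int)
  | [] => []
  | p :: t => List.replicate p.2.toNat (p.1, c.getD p.1 0 + 1) ++ pvBlocks (c.insert p.1 (c.getD p.1 0 + 1)) t

def pvFlat (R : List (Int × Int)) : List Int := R.flatMap (fun p => List.replicate p.2.toNat p.1)

-- A's third-loop step, on (value, run index) pairs, with F = final run count, G = element count
def pvStepA3 (F G : Int → Int) (rs : List Int × PySem.Set Int) (p : Int × Int) :
    List Int × PySem.Set Int :=
  if p.2 ≠ 1 then (rs.1 ++ [p.1], rs.2)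
  else if F p.1 = 1 ∧ G p.1 > 1 ∧ rs.2.contains p.1 = false then
    (rs.1 ++ [p.1], PySem.Set.add rs.2 p.1)
  else rs

-- B's third-loop step over runs
def pvStepB3 (F G : Int → Int) (rs : List Int × PySem.Dict Int Int) (p : Int × Int) :
    List Int × PySem.Dict Int Int :=
  let seen := rs.2.insert p.1 (rs.2.getD p.1 0 + 1)
  if seen.getD p.1 0 > 1 then (rs.1 ++ PySem.List.pyRepeat [p.1] p.2, seen)
  else if F p.1 = 1 ∧ G p.1 > 1 then (rs.1 ++ [p.1], seen)
  else (rs.1, seen)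

theorem pvCnt_append (c : PySem.Dict Int Int) (R : List (Int × Int)) (p : Int × Int) :
    pvCnt c (R ++ [p]) = (pvCnt c R).insert p.1 ((pvCnt c R).getD p.1 0 + 1) := by
  simp [pvCnt, List.foldl_append]

theorem pvM_append (c : PySem.Dict Int Int) (R : List (Int × Int)) (p : Int × Int) :
    pvM c (R ++ [p]) = pvM c R ++ List.replicate p.2.toNat ((pvCnt c R).getD p.1 0 + 1) := by
  induction R generalizing c with
  | nil => simp [pvM, pvCnt]
  | cons q t ih => simp [pvM, pvCnt, ih, List.foldl_cons]

theorem pvA3_repl_ne1 (F G : Int → Int) (v j : Int) (hj : j ≠ 1) (k : ℕ) :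
    ∀ res S, (List.replicate k (v, j)).foldl (pvStepA3 F G) (res, S)
      = (res ++ List.replicate k v, S) := by
  induction k with
  | zero => simp
  | succ k ih =>
    intro res S
    simp only [List.replicate_succ, List.foldl_cons, pvStepA3, if_pos hj, ih]
    simp

theorem pvA3_repl_mem (F G : Int → Int) (v : Int) (k : ℕ) :
    ∀ res S, v ∈ S → (List.replicate k (v, (1 : Int))).foldl (pvStepA3 F G) (res, S)
      = (res, S) := by
  induction k with
  | zero => simp
  | succ k ih =>
    intro res S hv
    have hc : PySem.Set.contains S v = true := (PySem.Set.contains_iff _ _).mpr hv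
    simp only [List.replicate_succ, List.foldl_cons, pvStepA3]
    rw [if_neg (by simp), if_neg (by simp; intro _ _; exact hv)]
    exact ih res S hv

theorem pvA3_repl_fail (F G : Int → Int) (v : Int) (hfail : ¬(F v = 1 ∧ G v > 1)) (k : ℕ) :
    ∀ res S, (List.replicate k (v, (1 : Int))).foldl (pvStepA3 F G) (res, S) = (res, S) := by
  induction k with
  | zero => simp
  | succ k ih =>
    intro res S
    simp only [List.replicate_succ, List.foldl_cons, pvStepA3]
    rw [if_neg (by simp), if_neg (by tauto)]
    exact ih res S

theorem pvA3_repl_first (F G : Int → Int) (v : Int) (hok : F v = 1 ∧ G v > 1) (k : ℕ)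
    (hk : 1 ≤ k) (res : List Int) (S : PySem.Set Int) (hv : v ∉ S) :
    (List.replicate k (v, (1 : Int))).foldl (pvStepA3 F G) (res, S)
      = (res ++ [v], PySem.Set.add S v) := by
  obtain ⟨k, rfl⟩ : ∃ k', k = k' + 1 := ⟨k - 1, by omega⟩
  have hc : PySem.Set.contains S v = false := by
    cases h : PySem.Set.contains S v with
    | true => exact absurd ((PySem.Set.contains_iff _ _).mp h) hv
    | false => rfl
  simp only [List.replicate_succ, List.foldl_cons, pvStepA3]
  rw [if_neg (by simp), if_pos ⟨hok.1, hok.2, hc⟩]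
  exact pvA3_repl_mem F G v k _ _ (by simp [PySem.Set.mem_add])

theorem pvFlat_append (R : List (Int × Int)) (p : Int × Int) :
    pvFlat (R ++ [p]) = pvFlat R ++ List.replicate p.2.toNat p.1 := by
  simp [pvFlat]

theorem pvSetdefaultInsert (d : PySem.Dict Int Int) (a : Int) :
    ((d.setdefault a 0).insert a ((d.setdefault a 0).getD a 0 + 1))
      = d.insert a (d.getD a 0 + 1) := by
  by_cases h : d.contains a = true
  · rw [PySem.Dict.setdefault_of_contains _ _ h]
  · rw [PySem.Dict.setdefault_of_not_contains _ _ (by simpa using h)]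
    rw [PySem.Dict.getD_insert_self, PySem.Dict.insert_insert_self,
      PySem.Dict.getD_of_not_contains _ _ (by simpa using h)]

theorem pvGetLastRepl (l : List Int) (j : Int) (k : ℕ) (hk : 1 ≤ k) :
    PySem.List.pyGetD (l ++ List.replicate k j) (-1) 0 = j := by
  obtain ⟨k, rfl⟩ : ∃ k', k = k' + 1 := ⟨k - 1, by omega⟩
  rw [List.replicate_succ', ← List.append_assoc]
  exact PySem.List.pyGetD_neg_one_append_singleton _ _ _

theorem pvMain1 (arr : List Int) :
    arr.foldl (fun (st : PySem.Dict Int Int × Option Int × List Int) a =>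
      match st with
      | (d, prev, m) =>
        if some a = prev then
          (d, some a, m ++ [PySem.List.pyGetD m (-1) 0])
        else
          let d0 := d.setdefault a 0
          let d1 := d0.insert a (d0.getD a 0 + 1)
          (d1, some a, m ++ [d1.getD a 0])
      ) (PySem.Dict.empty, none, [])
      = (pvCnt PySem.Dict.empty (arr.foldl pvStepR []),
         (arr.foldl pvStepR []).getLast?.map (fun p => p.1),
         pvM PySem.Dict.empty (arr.foldl pvStepR []))
    ∧ (∀ p ∈ arr.foldl pvStepR [], 1 ≤ p.2)
    ∧ pvFlat (arr.foldl pvStepR []) = arr := by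
  induction arr using List.reverseRecOn with
  | nil => exact ⟨rfl, by simp, rfl⟩
  | append_singleton xs a ih =>
    obtain ⟨ihA, ihN, ihF⟩ := ih
    rw [List.foldl_append, List.foldl_append, ihA]
    simp only [List.foldl_cons, List.foldl_nil]
    by_cases h : some a = ((xs.foldl pvStepR []).getLast?).map (fun p => p.1)
    · -- a extends the last run
      obtain ⟨⟨pv, pn⟩, hgl, hpa⟩ : ∃ p, (xs.foldl pvStepR []).getLast? = some p ∧ p.1 = a := by
        cases hg : (xs.foldl pvStepR []).getLast? with
        | none => rw [hg] at h; simp at h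
        | some q => rw [hg] at h; exact ⟨q, rfl, by simpa using h.symm⟩
      dsimp at hpa; subst hpa
      obtain ⟨R₀, hR⟩ := List.getLast?_eq_some_iff.mp hgl
      have hn : 1 ≤ pn := ihN _ (List.mem_of_getLast? hgl)
      have hR' : pvStepR (xs.foldl pvStepR []) pv = R₀ ++ [(pv, pn + 1)] := by
        rw [pvStepR, hgl]
        simp [hR]
      rw [if_pos h, hR']
      have hMsplit : pvM PySem.Dict.empty (xs.foldl pvStepR [])
          = pvM PySem.Dict.empty R₀
            ++ List.replicate pn.toNat ((pvCnt PySem.Dict.empty R₀).getD pv 0 + 1) := by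
        rw [hR]; exact pvM_append _ _ _
      refine ⟨?_, ?_, ?_⟩
      · refine Prod.ext ?_ (Prod.ext (by simp) ?_)
        · show pvCnt PySem.Dict.empty (xs.foldl pvStepR [])
            = pvCnt PySem.Dict.empty (R₀ ++ [(pv, pn + 1)])
          rw [hR, pvCnt_append, pvCnt_append]
        · show pvM PySem.Dict.empty (xs.foldl pvStepR [])
              ++ [PySem.List.pyGetD (pvM PySem.Dict.empty (xs.foldl pvStepR [])) (-1) 0]
            = pvM PySem.Dict.empty (R₀ ++ [(pv, pn + 1)])
          rw [pvM_append, hMsplit, pvGetLastRepl _ _ _ (by omega)]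
          have h1 : ((pv, pn + 1).2).toNat = pn.toNat + 1 := by simp; omega
          rw [h1, List.replicate_succ', List.append_assoc]
      · intro q hq
        rw [hR] at ihN
        rcases List.mem_append.mp hq with hq | hq
        · exact ihN q (List.mem_append.mpr (Or.inl hq))
        · obtain rfl := List.mem_singleton.mp hq; simp; omega
      · rw [pvFlat_append]
        rw [hR, pvFlat_append] at ihF
        have h1 : ((pv, pn + 1).2).toNat = pn.toNat + 1 := by simp; omega
        rw [h1, List.replicate_succ', ← List.append_assoc]
        simp only at ihF ⊢
        rw [ihF]
    · -- a starts a new run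
      have hR' : pvStepR (xs.foldl pvStepR []) a = (xs.foldl pvStepR []) ++ [(a, 1)] := by
        rw [pvStepR]
        cases hg : (xs.foldl pvStepR []).getLast? with
        | none => simp only; rw [List.getLast?_eq_none_iff.mp hg]; rfl
        | some q =>
          have : q.1 ≠ a := by
            rw [hg] at h; intro hqa; exact h (by simp [hqa])
          simp only [this, if_false]
      rw [if_neg h, hR']
      refine ⟨?_, ?_, ?_⟩
      · refine Prod.ext ?_ (Prod.ext (by simp) ?_)
        · show ((pvCnt PySem.Dict.empty (xs.foldl pvStepR [])).setdefault a 0).insert a _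
            = pvCnt PySem.Dict.empty ((xs.foldl pvStepR []) ++ [(a, 1)])
          rw [pvSetdefaultInsert, pvCnt_append]
        · show pvM PySem.Dict.empty (xs.foldl pvStepR []) ++ [_]
            = pvM PySem.Dict.empty ((xs.foldl pvStepR []) ++ [(a, 1)])
          rw [pvM_append]
          rw [pvSetdefaultInsert, PySem.Dict.getD_insert_self]
          rfl
      · intro q hq
        rcases List.mem_append.mp hq with hq | hq
        · exact ihN q hq
        · simp at hq; subst hq; simp
      · rw [pvFlat_append, ihF]; rfl

theorem pvSim (F G : Int → Int) (R : List (Int × Int)) (c : PySem.Dict Int Int)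
    (S : PySem.Set Int) (res : List Int)
    (hS : ∀ v ∈ S, 1 ≤ c.getD v 0) (hnn : ∀ v, 0 ≤ c.getD v 0)
    (hR : ∀ p ∈ R, 1 ≤ p.2) :
    ((pvBlocks c R).foldl (pvStepA3 F G) (res, S)).1
      = (R.foldl (pvStepB3 F G) (res, c)).1 := by
  induction R generalizing c S res with
  | nil => simp [pvBlocks]
  | cons p t ih =>
    have hp2 : 1 ≤ p.2 := hR p (by simp)
    have hk : 1 ≤ p.2.toNat := by omega
    simp only [pvBlocks, List.foldl_cons, List.foldl_append, pvStepB3]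
    have hseen : (c.insert p.1 (c.getD p.1 0 + 1)).getD p.1 0 = c.getD p.1 0 + 1 :=
      PySem.Dict.getD_insert_self c p.1 _ 0
    have hS' : ∀ v ∈ S, 1 ≤ (c.insert p.1 (c.getD p.1 0 + 1)).getD v 0 := by
      intro v hv
      rw [PySem.Dict.getD_insert]
      split_ifs with h
      · have := hnn p.1; omega
      · exact hS v hv
    have hnn' : ∀ v, 0 ≤ (c.insert p.1 (c.getD p.1 0 + 1)).getD v 0 := by
      intro v
      rw [PySem.Dict.getD_insert]
      split_ifs with h
      · have := hnn p.1; omega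
      · exact hnn v
    have hRt : ∀ q ∈ t, 1 ≤ q.2 := fun q hq => hR q (by simp [hq])
    rw [hseen]
    rcases lt_or_eq_of_le (hnn p.1) with hpos | hzero
    · -- not the first run of this value: the whole run is kept by both
      rw [if_pos (by omega)]
      rw [pvA3_repl_ne1 F G p.1 _ (by omega)]
      rw [PySem.List.pyRepeat_singleton]
      exact ih _ S _ hS' hnn' hRt
    · -- first run of this value
      have hnotmem : p.1 ∉ S := fun hv => by have := hS p.1 hv; omega
      have h0 : c.getD p.1 0 = 0 := hzero.symm
      rw [if_neg (by omega)]
      rw [h0, zero_add] at hS' hnn' ⊢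
      by_cases hcond : F p.1 = 1 ∧ G p.1 > 1
      · rw [pvA3_repl_first F G p.1 hcond _ hk res S hnotmem, if_pos hcond]
        refine ih _ _ _ ?_ hnn' hRt
        intro v hv
        rcases (PySem.Set.mem_add _ _ _).mp hv with hv | rfl
        · exact hS' v hv
        · rw [PySem.Dict.getD_insert_self c p.1 1 0]
      · rw [pvA3_repl_fail F G p.1 hcond, if_neg hcond]
        refine ih _ _ _ ?_ hnn' hRt
        intro v hv
        exact hS' v hv

theorem pvTotGetD (R : List (Int × Int)) (v : Int) : ∀ t0 : PySem.Dict Int Int,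
    (R.foldl (fun t p => t.insert p.1 (t.getD p.1 0 + p.2)) t0).getD v 0
      = t0.getD v 0 + ((R.filter (fun p => p.1 == v)).map (fun p => p.2)).sum := by
  induction R with
  | nil => simp
  | cons p t ih =>
    intro t0
    rw [List.foldl_cons, ih, List.filter_cons]
    by_cases h : p.1 = v
    · rw [if_pos (by simpa using h)]
      rw [PySem.Dict.getD_insert, if_pos h.symm, h]
      simp only [List.map_cons, List.sum_cons]
      omega
    · rw [if_neg (by simpa using h)]
      rw [PySem.Dict.getD_insert, if_neg (fun hh : v = p.1 => h hh.symm)]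

theorem pvFlatCount (R : List (Int × Int)) (hR : ∀ p ∈ R, 0 ≤ p.2) (v : Int) :
    (((pvFlat R).count v : ℕ) : Int)
      = ((R.filter (fun p => p.1 == v)).map (fun p => p.2)).sum := by
  induction R with
  | nil => simp [pvFlat]
  | cons p t ih =>
    have hp : 0 ≤ p.2 := hR p (by simp)
    have iht := ih (fun q hq => hR q (by simp [hq]))
    rw [pvFlat, List.flatMap_cons, List.count_append, List.filter_cons]
    rw [show (pvFlat t) = t.flatMap (fun p => List.replicate p.2.toNat p.1) from rfl] at iht
    by_cases h : p.1 = v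
    · rw [if_pos (by simpa using h)]
      rw [List.count_replicate, if_pos (by simpa using h)]
      simp only [List.map_cons, List.sum_cons]
      rw [← iht]; push_cast; omega
    · rw [if_neg (by simpa using h)]
      rw [List.count_replicate, if_neg (by simpa using h)]
      rw [← iht]; push_cast; omega

theorem pvZipRepl (v j : Int) (k : ℕ) :
    (List.replicate k v).zip (List.replicate k j) = List.replicate k (v, j) := by
  induction k with
  | zero => simp
  | succ k ih => simp [List.replicate_succ, ih]

theorem pvZip (R : List (Int × Int)) : ∀ c,
    (pvFlat R).zip (pvM c R) = pvBlocks c R := by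
  induction R with
  | nil => simp [pvFlat, pvM, pvBlocks]
  | cons p t ih =>
    intro c
    rw [pvFlat, List.flatMap_cons, pvM, pvBlocks,
      List.zip_append (by simp), pvZipRepl]
    rw [show (t.flatMap (fun p => List.replicate p.2.toNat p.1)) = pvFlat t from rfl, ih]

theorem pvMLen (R : List (Int × Int)) : ∀ c, (pvM c R).length = (pvFlat R).length := by
  induction R with
  | nil => simp [pvM, pvFlat]
  | cons p t ih =>
    intro c
    rw [pvM, pvFlat, List.flatMap_cons, List.length_append, List.length_append,
      ih (c.insert p.1 (c.getD p.1 0 + 1))]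
    simp only [List.length_replicate]
    rfl

theorem pvRangeZip (xs ms : List Int) (h : ms.length = xs.length)
    (g : List Int × PySem.Set Int → Int → Int → List Int × PySem.Set Int)
    (init : List Int × PySem.Set Int) :
    (PySem.List.pyRange 0 (PySem.List.len xs) 1).foldl
        (fun rs i => g rs (PySem.List.pyGetD xs i 0) (PySem.List.pyGetD ms i 0)) init
      = (xs.zip ms).foldl (fun rs p => g rs p.1 p.2) init := by
  have hzlen : (xs.zip ms).length = xs.length := by simp [List.length_zip, h]
  have hlen : PySem.List.len xs = PySem.List.len (xs.zip ms) := by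
    rw [PySem.List.len_eq, PySem.List.len_eq, hzlen]
  rw [hlen]
  have hcongr := PySem.List.foldl_congr_mem
    (PySem.List.pyRange 0 (PySem.List.len (xs.zip ms)) 1)
    (fun rs i => g rs (PySem.List.pyGetD xs i 0) (PySem.List.pyGetD ms i 0))
    (fun rs i => g rs (PySem.List.pyGetD (xs.zip ms) i (0, 0)).1
      (PySem.List.pyGetD (xs.zip ms) i (0, 0)).2)
    init
    (by
      intro acc i hi
      obtain ⟨h0, h1⟩ := PySem.List.mem_pyRange_one.mp hi
      rw [PySem.List.len_eq, hzlen] at h1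
      show g acc (PySem.List.pyGetD xs i 0) (PySem.List.pyGetD ms i 0)
        = g acc (PySem.List.pyGetD (xs.zip ms) i (0, 0)).1
            (PySem.List.pyGetD (xs.zip ms) i (0, 0)).2
      have hbx : i < (xs.length : Int) := h1
      have hbm : i < (ms.length : Int) := by rw [h]; exact h1
      have hbz : i < ((xs.zip ms).length : Int) := by rw [hzlen]; exact h1
      rw [PySem.List.pyGetD_eq_getElem _ _ h0 hbx,
        PySem.List.pyGetD_eq_getElem _ _ h0 hbm,
        PySem.List.pyGetD_eq_getElem _ _ h0 hbz]
      simp [List.getElem_zip])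
  rw [hcongr]
  exact PySem.List.foldl_pyRange_zero_pyGetD (xs.zip ms) (0, 0)
    (fun rs p => g rs p.1 p.2) init

-- ===== VERDICT (by name: the statement is the Claim_ definition above) =====
theorem f_spec : Claim_equal_f := by
  unfold Claim_equal_f Spec_f
  intro arr _
  obtain ⟨hA, hN, hF⟩ := pvMain1 arr
  show f arr = f_alt arr
  rw [f, f_alt]
  rw [hA]
  dsimp only
  have hstepR : (fun (runs : List (Int × Int)) (a : Int) =>
      match runs.getLast? with
      | some (v, n) => if v = a then runs.dropLast ++ [(v, n + 1)] else runs ++ [(a, 1)]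
      | none => [(a, 1)]) = pvStepR := rfl
  rw [hstepR]
  set R := List.foldl pvStepR [] arr with hRdef
  apply (show ∀ (u v : List Int), u = v →
      (PySem.Int.toStr (u.length : Int) ++ "\n" ++
        PySem.Str.join "" (u.map (fun r => PySem.Int.toStr r ++ " ")))
      = (PySem.Int.toStr (v.length : Int) ++ "\n" ++
        PySem.Str.join "" (v.map (fun r => PySem.Int.toStr r ++ " ")))
    from by rintro u v rfl; rfl)
  -- the two result lists coincide
  have hG : ∀ v : Int,
      (List.foldl (fun (t : PySem.Dict Int Int) (a : Int) => t.insert a (t.getD a 0 + 1))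
          PySem.Dict.empty arr).getD v 0
        = (List.foldl (fun (t : PySem.Dict Int Int) (p : Int × Int) =>
              t.insert p.1 (t.getD p.1 0 + p.2)) PySem.Dict.empty R).getD v 0 := by
    intro v
    rw [PySem.Dict.getD_foldl_insert_add_one, pvTotGetD R v,
      ← pvFlatCount R (fun p hp => le_trans (by omega) (hN p hp)) v, hF]
  simp only [hG]
  have hlen : (pvM PySem.Dict.empty R).length = arr.length := by
    rw [pvMLen, hF]
  have h1 := pvRangeZip arr (pvM PySem.Dict.empty R) hlen (fun rs x y =>
      if y ≠ 1 then (rs.1 ++ [x], rs.2)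
      else if (pvCnt PySem.Dict.empty R).getD x 0 = 1 ∧
          (List.foldl (fun (t : PySem.Dict Int Int) (p : Int × Int) =>
              t.insert p.1 (t.getD p.1 0 + p.2)) PySem.Dict.empty R).getD x 0 > 1 ∧
          rs.2.contains x = false then
        (rs.1 ++ [x], rs.2.add x)
      else rs) ([], PySem.Set.empty)
  beta_reduce at h1
  rw [h1]
  have hzip : arr.zip (pvM PySem.Dict.empty R) = pvBlocks PySem.Dict.empty R := by
    rw [← hF]; exact pvZip R _
  rw [hzip]
  rw [PySem.List.foldl_prod_mk
    (f := fun (t : PySem.Dict Int Int) (p : Int × Int) => t.insert p.1 (t.getD p.1 0 + 1))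
    (g := fun (t : PySem.Dict Int Int) (p : Int × Int) => t.insert p.1 (t.getD p.1 0 + p.2))]
  exact pvSim (fun v => (pvCnt PySem.Dict.empty R).getD v 0)
    (fun v => (List.foldl (fun (t : PySem.Dict Int Int) (p : Int × Int) =>
        t.insert p.1 (t.getD p.1 0 + p.2)) PySem.Dict.empty R).getD v 0)
    R PySem.Dict.empty PySem.Set.empty []
    (by intro v hv; simp [PySem.Set.empty] at hv)
    (by intro v; simp)
    hN
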